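-- pv_equiv track=rewrite | github.com/vmchaz/ibpdl | tvsf.py | SplitStringByFirstSymbol
-- ===== SOURCE A (Python) =====
-- def SplitStringByFirstSymbol(S, Sym):
--     sm = False
--     rs = ["", ""]
--     for C in S:
--         if C != Sym:
--             rs[int(sm)] += C
--         else:
--             if sm == False:
--                 sm = True
--             else:
--                 rs[int(sm)] += C
--
--     return rs[0], rs[1]
-- ===== SOURCE B (Python) =====
-- def SplitStringByFirstSymbol(S, Sym):
--     for i, C in enumerate(S):
--         if C == Sym:
--             return S[:i], S[i+1:]
--     return S, ""
-- ===== Notes on version B (the rewrite author's own statement) =====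
-- stated objective: simpler
-- what changed: Replaces the two accumulating string buffers and boolean mode flag with a single enumerate scan that returns slices (S[:i], S[i+1:]) at the first matching character, or (S, "") if none matches.
import Mathlib
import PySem

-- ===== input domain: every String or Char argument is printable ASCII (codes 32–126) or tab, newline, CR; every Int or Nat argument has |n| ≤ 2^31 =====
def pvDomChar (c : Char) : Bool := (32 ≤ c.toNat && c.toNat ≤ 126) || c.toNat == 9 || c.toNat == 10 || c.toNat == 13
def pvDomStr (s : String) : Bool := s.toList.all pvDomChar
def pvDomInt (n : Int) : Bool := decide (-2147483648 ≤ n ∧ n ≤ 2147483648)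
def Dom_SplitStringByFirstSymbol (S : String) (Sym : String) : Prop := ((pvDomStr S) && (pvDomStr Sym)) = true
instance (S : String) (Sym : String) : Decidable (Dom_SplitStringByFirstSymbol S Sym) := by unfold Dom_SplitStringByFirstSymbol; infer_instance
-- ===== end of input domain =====

-- B replaces A's two accumulating buffers and boolean mode flag with a single
-- index scan that slices the string at the first matching character (simpler).

-- ===== PORT A =====
-- loop body; state: (sm, rs0, rs1).  Iterating over a Python string yields
-- one-char strings, so 'C != Sym' is ported as 'String.ofList [C] ≠ Sym'.
def pvStepA (Sym : String) (st : Bool × List Char × List Char) (C : Char) : Bool × List Char × List Char :=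
  let (sm, r0, r1) := st
  if String.ofList [C] ≠ Sym then
    (if sm then (sm, r0, r1 ++ [C]) else (sm, r0 ++ [C], r1))
  else
    if sm = false then (true, r0, r1)
    else (sm, r0, r1 ++ [C])

def SplitStringByFirstSymbol (S : String) (Sym : String) : String × String :=
  let st := S.toList.foldl (pvStepA Sym) (false, [], [])
  (String.ofList st.2.1, String.ofList st.2.2)

-- ===== PORT B =====
-- first index i with S[i] == Sym (B's enumerate loop), else none
def pvFindSym : List Char → String → Nat → Option Nat
  | [], _, _ => none
  | C :: rest, Sym, i => if String.ofList [C] == Sym then some i else pvFindSym rest Sym (i + 1)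

def SplitStringByFirstSymbol_alt (S : String) (Sym : String) : String × String :=
  match pvFindSym S.toList Sym 0 with
  | some i => (String.ofList (S.toList.take i), String.ofList (S.toList.drop (i + 1)))
  | none => (S, "")

-- ===== PRECONDITION & SPEC =====
def Spec_SplitStringByFirstSymbol (S : String) (Sym : String) (out : String × String) : Prop := out = SplitStringByFirstSymbol_alt S Sym
instance (S : String) (Sym : String) (out : String × String) : Decidable (Spec_SplitStringByFirstSymbol S Sym out) := by unfold Spec_SplitStringByFirstSymbol; infer_instance

-- ===== CLAIM (what is proved, stated in full; the proofs are below) =====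
def Claim_equal_SplitStringByFirstSymbol : Prop := ∀ (S : String) (Sym : String), Dom_SplitStringByFirstSymbol S Sym → Spec_SplitStringByFirstSymbol S Sym (SplitStringByFirstSymbol S Sym)

-- ===== LEMMAS AND PROOFS =====

-- after the flag is set, A appends every remaining character to rs[1]
theorem pvA_phase2 (l : List Char) (Sym : String) (r0 r1 : List Char) :
    l.foldl (pvStepA Sym) (true, r0, r1) = (true, r0, r1 ++ l) := by
  induction l generalizing r1 with
  | nil => simp
  | cons C rest ih =>
    simp only [List.foldl_cons]
    by_cases h : String.ofList [C] = Sym <;> simp [pvStepA, h, ih]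

-- pvFindSym shifts uniformly with its counter
theorem pvFindSym_succ (Sym : String) (l : List Char) (i : Nat) :
    pvFindSym l Sym (i + 1) = (pvFindSym l Sym i).map (· + 1) := by
  induction l generalizing i with
  | nil => simp [pvFindSym]
  | cons a t iht => simp only [pvFindSym]; split <;> simp [iht]

-- phase 1 (flag still false): A's fold characterised by pvFindSym
theorem pvA_phase1 (l : List Char) (Sym : String) (r0 : List Char) :
    l.foldl (pvStepA Sym) (false, r0, []) =
    match pvFindSym l Sym 0 with
    | some i => (true, r0 ++ l.take i, l.drop (i + 1))
    | none => (false, r0 ++ l, []) := by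
  induction l generalizing r0 with
  | nil => simp [pvFindSym]
  | cons C rest ih =>
    simp only [List.foldl_cons, pvFindSym]
    by_cases h : String.ofList [C] = Sym
    · simp [pvStepA, h, pvA_phase2]
    · have hb : (String.ofList [C] == Sym) = false := by simp [h]
      simp only [pvStepA, hb, ne_eq, h, not_false_eq_true, if_true, if_false, Bool.false_eq_true]
      rw [ih (r0 ++ [C]), pvFindSym_succ]
      cases pvFindSym rest Sym 0 <;> simp

-- ===== VERDICT (by name: the statement is the Claim_ definition above) =====
theorem SplitStringByFirstSymbol_spec : Claim_equal_SplitStringByFirstSymbol := by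
  intro S Sym _
  unfold Spec_SplitStringByFirstSymbol SplitStringByFirstSymbol SplitStringByFirstSymbol_alt
  rw [pvA_phase1 S.toList Sym []]
  cases h : pvFindSym S.toList Sym 0 with
  | some i => simp
  | none => simp
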